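-- pv_equiv track=rewrite | github.com/AliKhanat88/codeforces | new_2024 batch/valid_code.py | temp_valid
-- ===== SOURCE A (Python) =====
-- def temp_valid(n, arr, ans):
--     if ans == 0:
--         active = True
--     else:
--         active = False
--     sumi = 0
--     for j in range(n):
--         if active:
--             sumi = max(sumi + arr[j], ans)
--         else:
--             sumi += arr[j]
--         if sumi >= ans:
--             active = True
--     return sumi
-- ===== SOURCE B (Python) =====
-- def temp_valid(n, arr, ans):
--     # Closed form via prefix sums: find the activation point (first prefix sum
--     # reaching ans; index 0 when ans == 0), then the clamped tail loop of the
--     # original collapses to max(total, ans + total - min(prefix sums after the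
--     # activation point)). Three simple passes, no clamping loop, no flag.
--     P = [0]
--     s = 0
--     for j in range(n):
--         s += arr[j]
--         P.append(s)
--     N = len(P) - 1
--     if ans == 0:
--         j0 = 0
--     else:
--         j0 = None
--         for k in range(1, N + 1):
--             if P[k] >= ans:
--                 j0 = k
--                 break
--         if j0 is None:
--             return s
--     if j0 == N:
--         return s
--     return max(s, ans + s - min(P[j0 + 1:]))
-- ===== Notes on version B (the rewrite author's own statement) =====
-- stated objective: alternative
-- what changed: Replaces A's single clamping pass with a boolean flag by a prefix-sum characterization: build the prefix-sum array, locate the activation index (first prefix sum >= ans, or 0 when ans == 0), and return the closed form max(total, ans + total - min(prefix sums after activation)) instead of iterating sumi = max(sumi + arr[j], ans).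
import Mathlib
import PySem

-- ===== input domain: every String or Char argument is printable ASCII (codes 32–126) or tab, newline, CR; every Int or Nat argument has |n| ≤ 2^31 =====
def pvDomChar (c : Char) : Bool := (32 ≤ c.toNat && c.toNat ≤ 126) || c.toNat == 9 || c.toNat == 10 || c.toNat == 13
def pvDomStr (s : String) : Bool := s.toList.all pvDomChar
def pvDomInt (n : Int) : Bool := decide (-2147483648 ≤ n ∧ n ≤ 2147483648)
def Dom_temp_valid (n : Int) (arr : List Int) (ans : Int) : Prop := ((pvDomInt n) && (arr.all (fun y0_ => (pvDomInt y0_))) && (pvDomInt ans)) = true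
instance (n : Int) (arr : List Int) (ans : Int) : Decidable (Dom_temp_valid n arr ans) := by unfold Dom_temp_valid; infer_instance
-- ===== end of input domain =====

-- B replaces A's clamping pass with a flag by a prefix-sum characterization: build the
-- prefix sums, find the activation index, and return the closed form
-- max(total, ans + total - min(prefix sums after activation)).

-- ===== PORT A =====
-- the body of A's for-loop, on state (active, sumi)
def tvStepA (arr : List Int) (ans : Int) (st : Bool × Int) (j : Int) : Bool × Int :=
  let sumi := if st.1 then max (st.2 + PySem.List.pyGetD arr j 0) ans
              else st.2 + PySem.List.pyGetD arr j 0
  (st.1 || decide (ans ≤ sumi), sumi)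

def temp_valid (n : Int) (arr : List Int) (ans : Int) : Int :=
  -- flag/sum state threaded through 'for j in range(n)'; arr[j] via pyGetD
  -- (inside Pre_ every index is in range, so the default is never used)
  let init : Bool × Int := (decide (ans = 0), 0)
  let r := (PySem.List.pyRange 0 n 1).foldl (tvStepA arr ans) init
  r.2

-- ===== PORT B =====
-- 'P = [0]; s = 0; for j in range(n): s += arr[j]; P.append(s)'
def tvPrefix (arr : List Int) (n : Int) : List Int × Int :=
  (PySem.List.pyRange 0 n 1).foldl
    (fun ps j => let s := ps.2 + PySem.List.pyGetD arr j 0; (ps.1 ++ [s], s)) ([0], 0)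

-- 'for k in range(1, N+1): if P[k] >= ans: j0 = k; break' (none = the loop never broke)
def tvFind (P : List Int) (ans : Int) (N : Int) : Option Int :=
  (PySem.List.pyRange 1 (N + 1) 1).find? (fun k => decide (ans ≤ PySem.List.pyGetD P k 0))

def temp_valid_alt (n : Int) (arr : List Int) (ans : Int) : Int :=
  let ps := tvPrefix arr n
  let P := ps.1
  let s := ps.2
  let N : Int := (P.length : Int) - 1
  let j0? : Option Int := if ans = 0 then some 0 else tvFind P ans N
  match j0? with
  | none => s
  | some j0 =>
      if j0 = N then s
      else
        -- 'min(P[j0+1:])': the slice is nonempty here (j0 < N), so min? is never none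
        max s (ans + s - (PySem.List.min? (PySem.List.slice P (some (j0 + 1)) none)
                            (fun x => x)).getD 0)

-- ===== PRECONDITION & SPEC =====
-- Pre_ excludes exactly the inputs where the Python A raises IndexError (n > len(arr)).
def Pre_temp_valid (n : Int) (arr : List Int) (ans : Int) : Prop := n ≤ (arr.length : Int)
instance (n : Int) (arr : List Int) (ans : Int) : Decidable (Pre_temp_valid n arr ans) := by unfold Pre_temp_valid; infer_instance
def pvWitness_temp_valid : Int × List Int × Int := (3, ([1, -2, 3], 2))

def Spec_temp_valid (n : Int) (arr : List Int) (ans : Int) (out : Int) : Prop := out = temp_valid_alt n arr ans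
instance (n : Int) (arr : List Int) (ans : Int) (out : Int) : Decidable (Spec_temp_valid n arr ans out) := by unfold Spec_temp_valid; infer_instance

-- ===== CLAIM (what is proved, stated in full; the proofs are below) =====
def Claim_equal_temp_valid : Prop := ∀ (n : Int) (arr : List Int) (ans : Int), Dom_temp_valid n arr ans → Pre_temp_valid n arr ans → Spec_temp_valid n arr ans (temp_valid n arr ans)

-- ===== LEMMAS AND PROOFS =====

-- S arr k = the k-th prefix sum of arr (value of Python's running 's' after k steps)
def tvS (arr : List Int) : Nat → Int
  | 0 => 0
  | k + 1 => tvS arr k + PySem.List.pyGetD arr (k : Int) 0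

-- mins f j = min of tvS over indices j, j+1, …, j+f
def tvMins (arr : List Int) : Nat → Nat → Int
  | 0, j => tvS arr j
  | f + 1, j => min (tvS arr j) (tvMins arr f (j + 1))

-- A-side intermediate shapes (proof-only): the two monotone phases of A's loop
def tvPhase1 (arr : List Int) (ans : Int) : Nat → Int → Int → Int × Int
  | 0, j, sumi => (j, sumi)
  | fuel + 1, j, sumi =>
      let sumi' := sumi + PySem.List.pyGetD arr j 0
      if ans ≤ sumi' then (j + 1, sumi') else tvPhase1 arr ans fuel (j + 1) sumi'

def tvPhase2 (arr : List Int) (ans : Int) : Nat → Int → Int → Int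
  | 0, _, sumi => sumi
  | fuel + 1, j, sumi => tvPhase2 arr ans fuel (j + 1) (max (sumi + PySem.List.pyGetD arr j 0) ans)

theorem tvStepA_true (arr : List Int) (ans s j : Int) :
    tvStepA arr ans (true, s) j = (true, max (s + PySem.List.pyGetD arr j 0) ans) := by
  simp [tvStepA]

theorem tvStepA_false (arr : List Int) (ans s j : Int) :
    tvStepA arr ans (false, s) j
      = (decide (ans ≤ s + PySem.List.pyGetD arr j 0), s + PySem.List.pyGetD arr j 0) := by
  simp [tvStepA]

-- A's fold, once active, computes phase 2.
theorem tv_active (arr : List Int) (ans n : Int) :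
    ∀ (fuel : Nat) (j s : Int), (n - j).toNat = fuel →
    ((PySem.List.pyRange j n 1).foldl (tvStepA arr ans) (true, s)).2
      = tvPhase2 arr ans fuel j s := by
  intro fuel
  induction fuel with
  | zero =>
      intro j s h
      rw [PySem.List.pyRange_one_eq_nil (by omega)]
      simp [tvPhase2]
  | succ fuel ih =>
      intro j s h
      rw [PySem.List.pyRange_one_cons (by omega), List.foldl_cons, tvStepA_true]
      simp only [tvPhase2]
      exact ih (j + 1) _ (by omega)

-- A's fold, while inactive, computes phase 1 followed by phase 2.
theorem tv_inactive (arr : List Int) (ans n : Int) :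
    ∀ (fuel : Nat) (j s : Int), (n - j).toNat = fuel →
    ((PySem.List.pyRange j n 1).foldl (tvStepA arr ans) (false, s)).2
      = (let p := tvPhase1 arr ans fuel j s; tvPhase2 arr ans (n - p.1).toNat p.1 p.2) := by
  intro fuel
  induction fuel with
  | zero =>
      intro j s h
      rw [PySem.List.pyRange_one_eq_nil (by omega)]
      simp [tvPhase1, tvPhase2, h]
  | succ fuel ih =>
      intro j s h
      rw [PySem.List.pyRange_one_cons (by omega), List.foldl_cons, tvStepA_false]
      simp only [tvPhase1]
      by_cases hc : ans ≤ s + PySem.List.pyGetD arr j 0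
      · rw [decide_eq_true hc, if_pos hc]
        have hf : (n - (j + 1)).toNat = fuel := by omega
        simpa [hf] using tv_active arr ans n fuel (j + 1) (s + PySem.List.pyGetD arr j 0) hf
      · rw [decide_eq_false hc, if_neg hc]
        exact ih (j + 1) _ (by omega)

-- B's prefix fold builds the map of tvS over range.
theorem tvPrefix_go (arr : List Int) :
    ∀ (f j : Nat) (acc : List Int),
    (PySem.List.pyRange (j : Int) ((j : Int) + (f : Nat)) 1).foldl
        (fun ps i => let s := ps.2 + PySem.List.pyGetD arr i 0; (ps.1 ++ [s], s))
        (acc, tvS arr j)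
      = (acc ++ (List.range f).map (fun t => tvS arr (j + 1 + t)), tvS arr (j + f)) := by
  intro f
  induction f with
  | zero =>
      intro j acc
      rw [PySem.List.pyRange_one_eq_nil (by push_cast; omega)]
      simp
  | succ f ih =>
      intro j acc
      rw [PySem.List.pyRange_one_cons (by push_cast; omega), List.foldl_cons]
      have hstep : tvS arr j + PySem.List.pyGetD arr (j : Int) 0 = tvS arr (j + 1) := by
        simp [tvS]
      have hrange : ((j : Int) + 1) = ((j + 1 : Nat) : Int) := by push_cast; ring
      have hend : ((j : Int) + ((f + 1 : Nat) : Int)) = ((j + 1 : Nat) : Int) + (f : Nat) := by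
        push_cast; ring
      simp only [hstep, hrange, hend]
      rw [ih (j + 1) (acc ++ [tvS arr (j + 1)])]
      have h1 : ∀ t : Nat, j + 1 + 1 + t = j + 1 + (t + 1) := by omega
      have h2 : j + 1 + f = j + (f + 1) := by omega
      simp [List.range_succ_eq_map, List.map_map, Function.comp, h1, h2, List.append_assoc]

theorem tvPrefix_eq (arr : List Int) (n : Int) :
    tvPrefix arr n = ((List.range (n.toNat + 1)).map (tvS arr), tvS arr n.toNat) := by
  unfold tvPrefix
  by_cases h : 0 ≤ n
  · have hgo := tvPrefix_go arr n.toNat 0 [0]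
    have hcast : ((n.toNat : Nat) : Int) = n := Int.toNat_of_nonneg h
    simp only [Nat.cast_zero, zero_add, hcast,
      show tvS arr 0 = (0 : Int) from rfl] at hgo
    rw [hgo]
    have h1 : ∀ t : Nat, 1 + t = t + 1 := by omega
    simp [List.range_succ_eq_map, List.map_map, Function.comp, h1, tvS]
  · have hn : n.toNat = 0 := by omega
    rw [PySem.List.pyRange_one_eq_nil (by omega), hn]
    simp [tvS]

-- phase 1 from a prefix-sum state is the first index with tvS ≥ ans.
theorem tvPhase1_eq (arr : List Int) (ans : Int) :
    ∀ (f j : Nat),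
    tvPhase1 arr ans f (j : Int) (tvS arr j)
      = (match ((List.range f).map (fun t => j + 1 + t)).find?
              (fun k => decide (ans ≤ tvS arr k)) with
         | some k => ((k : Int), tvS arr k)
         | none => (((j + f : Nat) : Int), tvS arr (j + f))) := by
  intro f
  induction f with
  | zero => intro j; simp [tvPhase1]
  | succ f ih =>
      intro j
      simp only [tvPhase1]
      have hstep : tvS arr j + PySem.List.pyGetD arr (j : Int) 0 = tvS arr (j + 1) := rfl
      rw [hstep]
      have hlist : (List.range (f + 1)).map (fun t => j + 1 + t)
          = (j + 1) :: (List.range f).map (fun t => j + 1 + 1 + t) := by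
        rw [List.range_succ_eq_map, List.map_cons, List.map_map]
        congr 1
        apply List.map_congr_left
        intro t _
        simp [Function.comp]
        omega
      by_cases hc : ans ≤ tvS arr (j + 1)
      · rw [if_pos hc, hlist, List.find?_cons_of_pos (by simpa using hc)]
        simp
      · have hcast : (j : Int) + 1 = ((j + 1 : Nat) : Int) := by push_cast; ring
        rw [if_neg hc, hcast, ih (j + 1), hlist,
          List.find?_cons_of_neg (by simpa using hc)]
        have hend : j + 1 + f = j + (f + 1) := by omega
        rw [hend]

theorem tvFind_congr {α : Type} (l : List α) (p q : α → Bool)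
    (h : ∀ a ∈ l, p a = q a) : l.find? p = l.find? q := by
  induction l with
  | nil => rfl
  | cons a t ih =>
      have ha := h a (by simp)
      by_cases hp : p a = true
      · rw [List.find?_cons_of_pos hp, List.find?_cons_of_pos (ha ▸ hp)]
      · rw [List.find?_cons_of_neg (by simpa using hp),
          List.find?_cons_of_neg (by simp [← ha]; simpa using hp)]
        exact ih fun a ha => h a (by simp [ha])

-- B's loop-with-break over range(1, N+1) is the same find?.
theorem tvFind_eq (arr : List Int) (ans : Int) (N : Nat) :
    tvFind ((List.range (N + 1)).map (tvS arr)) ans (N : Int)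
      = Option.map (fun k : Nat => (k : Int))
          (((List.range N).map (fun t => 0 + 1 + t)).find?
            (fun k => decide (ans ≤ tvS arr k))) := by
  unfold tvFind
  have h1 : (((N : Int) + 1) - 1).toNat = N := by omega
  have hrange : PySem.List.pyRange 1 ((N : Int) + 1) 1
      = (List.range N).map (fun k : Nat => (1 : Int) + k) := by
    rw [PySem.List.pyRange_one, h1]
  rw [hrange, List.find?_map, List.find?_map, Option.map_map]
  have hpred : ∀ k ∈ List.range N,
      ((fun i => decide (ans ≤ PySem.List.pyGetD ((List.range (N + 1)).map (tvS arr)) i 0))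
          ∘ (fun k : Nat => (1 : Int) + k)) k
        = ((fun k => decide (ans ≤ tvS arr k)) ∘ (fun t : Nat => 0 + 1 + t)) k := by
    intro k hk
    have hk' : k < N := List.mem_range.mp hk
    have hlt : 1 + k < N + 1 := by omega
    have hcast : (1 : Int) + (k : Nat) = ((1 + k : Nat) : Int) := by push_cast; ring
    have h01 : 0 + 1 + k = 1 + k := by omega
    have hget : PySem.List.pyGetD ((List.range (N + 1)).map (tvS arr)) ((1 + k : Nat) : Int) 0
        = tvS arr (1 + k) := by
      rw [PySem.List.pyGetD_natCast]
      simp [List.getD_eq_getElem?_getD, hlt]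
    simp only [Function.comp, hcast, hget, h01]
  rw [tvFind_congr _ _ _ hpred]
  congr 1

-- phase 2 closed form: running clamp = max(total-path, ans + total - min of later prefix sums).
theorem tvPhase2_closed (arr : List Int) (ans : Int) :
    ∀ (f j : Nat) (s : Int),
    tvPhase2 arr ans (f + 1) (j : Int) s
      = max (s + (tvS arr (j + 1 + f) - tvS arr j))
            (ans + tvS arr (j + 1 + f) - tvMins arr f (j + 1)) := by
  intro f
  induction f with
  | zero =>
      intro j s
      have hB : tvS arr (j + 1) = tvS arr j + PySem.List.pyGetD arr (j : Int) 0 := rfl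
      simp only [tvPhase2, tvMins, Nat.add_zero]
      simp only [max_def]
      split_ifs <;> omega
  | succ f ih =>
      intro j s
      rw [show tvPhase2 arr ans (f + 1 + 1) (j : Int) s
            = tvPhase2 arr ans (f + 1) ((j : Int) + 1)
                (max (s + PySem.List.pyGetD arr (j : Int) 0) ans) from rfl]
      have hcast : (j : Int) + 1 = ((j + 1 : Nat) : Int) := by push_cast; ring
      rw [hcast, ih (j + 1)]
      have hB : tvS arr (j + 1) = tvS arr j + PySem.List.pyGetD arr (j : Int) 0 := rfl
      have hidx : j + 1 + 1 + f = j + 1 + (f + 1) := by omega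
      rw [hidx]
      simp only [tvMins]
      simp only [max_def, min_def]
      split_ifs <;> omega

-- folding min over a mapped range' is tvMins
theorem tvFoldMin (arr : List Int) :
    ∀ (f j : Nat) (x : Int),
    ((List.range' j f).map (tvS arr)).foldl min x
      = (match f with | 0 => x | g + 1 => min x (tvMins arr g j)) := by
  intro f
  induction f with
  | zero => intro j x; simp
  | succ g ih =>
      intro j x
      rw [List.range'_succ, List.map_cons, List.foldl_cons, ih (j + 1)]
      cases g with
      | zero => simp [tvMins]
      | succ g' => simp [tvMins, min_assoc]

-- min of the mapped range' slice is tvMins.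
theorem tvMin_slice (arr : List Int) :
    ∀ (f j : Nat),
    PySem.List.min? ((List.range' j (f + 1)).map (tvS arr)) (fun x => x)
      = some (tvMins arr f j) := by
  intro f j
  rw [List.range'_succ, List.map_cons, PySem.List.min?_id_cons, tvFoldMin]
  cases f with
  | zero => simp [tvMins]
  | succ g => simp [tvMins]

-- dropping the first k+1 entries of the prefix-sum list leaves the mapped range'
theorem tvDrop (arr : List Int) (N m : Nat) :
    ((List.range (N + 1)).map (tvS arr)).drop m = (List.range' m (N + 1 - m)).map (tvS arr) := by
  rw [← List.map_drop, List.range_eq_range', List.drop_range']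
  simp

-- ===== VERDICT (by name: the statement is the Claim_ definition above) =====
theorem temp_valid_spec : Claim_equal_temp_valid := by
  intro n arr ans _ _
  unfold Spec_temp_valid temp_valid temp_valid_alt
  simp only [tvPrefix_eq arr n, List.length_map, List.length_range]
  have hN1 : (((n.toNat + 1 : Nat) : Int)) - 1 = (n.toNat : Int) := by push_cast; ring
  simp only [hN1]
  by_cases h0 : ans = 0
  · -- active from the start
    simp only [h0, decide_true, if_true]
    rw [tv_active arr 0 n n.toNat 0 0 (by omega)]
    cases hNz : n.toNat with
    | zero => simp [tvPhase2, tvS]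
    | succ f =>
        have hne : ¬ ((0 : Int) = ((f + 1 : Nat) : Int)) := by push_cast; omega
        rw [if_neg hne]
        rw [show ((0 : Int)) = ((0 : Nat) : Int) from rfl, tvPhase2_closed]
        simp only [Nat.cast_zero]
        rw [show ((0 : Int) + 1) = ((1 : Nat) : Int) from by norm_num,
          PySem.List.slice_from_natCast, tvDrop arr (f + 1) 1]
        rw [show f + 1 + 1 - 1 = f + 1 from by omega, tvMin_slice arr f 1]
        have e1 : 0 + 1 + f = f + 1 := by omega
        have e2 : (0 : Nat) + 1 = 1 := by omega
        rw [e1, e2]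
        have hS0 : tvS arr 0 = 0 := rfl
        rw [hS0]
        simp only [Option.getD_some, max_def]
        split_ifs <;> omega
  · -- inactive phase first
    simp only [h0, decide_false, if_false]
    rw [tv_inactive arr ans n n.toNat 0 0 (by omega)]
    have hA := tvPhase1_eq arr ans n.toNat 0
    simp only [Nat.cast_zero, Nat.zero_add, show tvS arr 0 = (0 : Int) from rfl] at hA
    rw [hA, tvFind_eq arr ans n.toNat]
    simp only [Nat.zero_add]
    cases hF : ((List.range n.toNat).map (fun t => 1 + t)).find?
        (fun k => decide (ans ≤ tvS arr k)) with
    | none =>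
        simp only [Option.map_none]
        have hfuel : (n - ((n.toNat : Nat) : Int)).toNat = 0 := by omega
        rw [hfuel]
        simp [tvPhase2]
    | some k =>
        have hk := List.mem_of_find?_eq_some hF
        simp only [List.mem_map, List.mem_range] at hk
        obtain ⟨t, ht, hkt⟩ := hk
        have h1k : 1 ≤ k := by omega
        have hkN : k ≤ n.toNat := by omega
        have hn0 : 0 ≤ n := by omega
        simp only [Option.map_some]
        by_cases hke : k = n.toNat
        · have hfuel : (n - ((k : Nat) : Int)).toNat = 0 := by omega
          rw [hfuel, if_pos (show ((k : Nat) : Int) = ((n.toNat : Nat) : Int) from by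
            exact_mod_cast hke)]
          simp [tvPhase2, hke]
        · have hklt : k < n.toNat := by omega
          have hfuel : (n - ((k : Nat) : Int)).toNat = (n.toNat - k - 1) + 1 := by omega
          rw [hfuel, tvPhase2_closed]
          rw [if_neg (fun hc => by exact absurd (by exact_mod_cast hc : k = n.toNat) hke)]
          rw [show ((k : Nat) : Int) + 1 = ((k + 1 : Nat) : Int) from by push_cast; ring,
            PySem.List.slice_from_natCast, tvDrop arr n.toNat (k + 1)]
          rw [show n.toNat + 1 - (k + 1) = (n.toNat - k - 1) + 1 from by omega,
            tvMin_slice arr (n.toNat - k - 1) (k + 1)]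
          have e1 : k + 1 + (n.toNat - k - 1) = n.toNat := by omega
          rw [e1]
          simp only [Option.getD_some, max_def]
          split_ifs <;> omega
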